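-- pv_equiv track=rewrite | github.com/eliottcassidy2000/math | 04-computation/global_max_test_p23.py | is_valid_tournament_set
-- ===== SOURCE A (Python) =====
-- def is_valid_tournament_set(S, p):
--     m = (p - 1) // 2
--     if len(S) != m:
--         return False
--     S_set = set(S)
--     for j in range(1, m + 1):
--         if (j in S_set) == ((p - j) in S_set):
--             return False
--     return True
-- ===== SOURCE B (Python) =====
-- def is_valid_tournament_set(S, p):
--     m = (p - 1) // 2
--     T = set(S)
--     return (len(S) == m and len(T) == m
--             and all(1 <= s <= p - 1 and (p - s) not in T for s in T))
-- ===== Notes on version B (the rewrite author's own statement) =====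
-- stated objective: alternative
-- what changed: A scans the index range j=1..m testing each pair {j, p-j} for exactly-one membership; B never iterates over the range: it checks |S|==m, |set(S)|==m, and that every element of set(S) lies in [1, p-1] with its reflection p-s absent, which covers each pair exactly once by a counting argument.
import Mathlib
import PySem

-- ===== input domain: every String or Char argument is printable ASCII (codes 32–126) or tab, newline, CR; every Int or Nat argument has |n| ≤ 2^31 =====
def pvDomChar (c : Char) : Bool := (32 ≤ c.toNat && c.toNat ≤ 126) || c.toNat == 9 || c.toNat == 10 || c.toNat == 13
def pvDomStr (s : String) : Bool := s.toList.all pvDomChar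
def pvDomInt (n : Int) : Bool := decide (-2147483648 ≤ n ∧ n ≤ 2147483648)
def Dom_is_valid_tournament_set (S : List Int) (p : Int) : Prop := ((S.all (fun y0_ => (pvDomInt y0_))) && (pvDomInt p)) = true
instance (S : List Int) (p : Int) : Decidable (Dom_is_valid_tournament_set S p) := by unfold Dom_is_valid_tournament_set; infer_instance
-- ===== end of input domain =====

-- B replaces A's scan over the index range 1..m (one XOR test per j) by set-level
-- reasoning on S itself: |S| = |set(S)| = m, every element in range, reflection-disjoint.
-- Objective: alternative (same cost, different traversal); equal on all inputs.

-- ===== PORT A =====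
-- the 'for j in range(1, m+1): if (j in S_set) == ((p-j) in S_set): return False' loop
def pvALoop (Sset : PySem.Set Int) (p : Int) : List Int → Bool
  | [] => true
  | j :: rest =>
      if (PySem.Set.contains Sset j) = (PySem.Set.contains Sset (p - j)) then false
      else pvALoop Sset p rest

def is_valid_tournament_set (S : List Int) (p : Int) : Bool :=
  let m := PySem.Int.floordiv (p - 1) 2
  if (S.length : Int) ≠ m then false
  else
    let Sset := PySem.Set.ofList S
    pvALoop Sset p (PySem.List.pyRange 1 (m + 1) 1)

-- ===== PORT B =====
def is_valid_tournament_set_alt (S : List Int) (p : Int) : Bool :=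
  let m := PySem.Int.floordiv (p - 1) 2
  let T := PySem.Set.ofList S
  decide ((S.length : Int) = m) && decide ((T.length : Int) = m) &&
    T.all (fun s => decide (1 ≤ s ∧ s ≤ p - 1) && !(PySem.Set.contains T (p - s)))

-- ===== PRECONDITION & SPEC =====
def Spec_is_valid_tournament_set (S : List Int) (p : Int) (out : Bool) : Prop := out = is_valid_tournament_set_alt S p
instance (S : List Int) (p : Int) (out : Bool) : Decidable (Spec_is_valid_tournament_set S p out) := by unfold Spec_is_valid_tournament_set; infer_instance

-- ===== CLAIM (what is proved, stated in full; the proofs are below) =====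
def Claim_equal_is_valid_tournament_set : Prop := ∀ (S : List Int) (p : Int), Dom_is_valid_tournament_set S p → Spec_is_valid_tournament_set S p (is_valid_tournament_set S p)

-- ===== LEMMAS AND PROOFS =====

lemma pvALoop_eq_true (T : PySem.Set Int) (p : Int) (js : List Int) :
    pvALoop T p js = true ↔ ∀ j ∈ js, ¬(T.contains j = T.contains (p - j)) := by
  induction js with
  | nil => simp [pvALoop]
  | cons j rest ih =>
      simp only [pvALoop, List.mem_cons]
      split_ifs with h
      · constructor
        · intro h'; exact absurd h' (by simp)
        · intro hall; exact absurd h (hall j (Or.inl rfl))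
      · rw [ih]
        constructor
        · rintro hall x (rfl | hx)
          · exact h
          · exact hall x hx
        · intro hall x hx; exact hall x (Or.inr hx)

-- the combinatorial heart: for F ⊆ ℤ with |F| ≤ m and 2m+1 ≤ p ≤ 2m+2,
-- "each pair {j, p-j}, 1 ≤ j ≤ m, meets F exactly once" ↔ "|F| = m, F ⊆ [1,p-1], F disjoint from p - F"
lemma pvKey (F : Finset Int) (p m : Int)
    (h1 : 2 * m ≤ p - 1) (h2 : p - 1 ≤ 2 * m + 1)
    (hcard : (F.card : Int) ≤ m) :
    ((∀ j : Int, 1 ≤ j → j ≤ m → ((j ∈ F) ↔ (p - j) ∉ F)) ↔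
      ((F.card : Int) = m ∧ ∀ s ∈ F, (1 ≤ s ∧ s ≤ p - 1) ∧ (p - s) ∉ F)) := by
  have hm : 0 ≤ m := by
    have := F.card.cast_nonneg (α := Int)
    omega
  constructor
  · intro hA
    -- choose from each pair the element lying in F
    set c : Int → Int := fun j => if j ∈ F then j else p - j with hc
    have hcF : ∀ j ∈ Finset.Icc 1 m, c j ∈ F := by
      intro j hj
      simp only [Finset.mem_Icc] at hj
      by_cases h : j ∈ F
      · simp only [hc]; rw [if_pos h]; exact h
      · have hthis : (p - j) ∈ F := by
          by_contra hpj
          exact h ((hA j hj.1 hj.2).mpr hpj)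
        simp only [hc]; rw [if_neg h]; exact hthis
    have hinj : Set.InjOn c (Finset.Icc 1 m) := by
      intro j1 hj1 j2 hj2 he
      simp only [Finset.coe_Icc, Set.mem_Icc] at hj1 hj2
      by_cases m1 : j1 ∈ F <;> by_cases m2 : j2 ∈ F <;>
        simp only [hc, m1, m2, if_pos] at he <;> omega
    have himage : Finset.image c (Finset.Icc 1 m) ⊆ F := by
      intro x hx
      rcases Finset.mem_image.mp hx with ⟨j, hj, rfl⟩
      exact hcF j hj
    have hcardIcc : ((Finset.Icc (1:Int) m).card : Int) = m := by
      rw [Int.card_Icc]; omega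
    have hcardim : (Finset.image c (Finset.Icc 1 m)).card = (Finset.Icc (1:Int) m).card :=
      Finset.card_image_of_injOn hinj
    have hFcard : (F.card : Int) = m := by
      have hle := Finset.card_le_card himage
      omega
    have heq : Finset.image c (Finset.Icc 1 m) = F := by
      apply Finset.eq_of_subset_of_card_le himage
      omega
    refine ⟨hFcard, ?_⟩
    intro s hs
    rw [← heq] at hs
    rcases Finset.mem_image.mp hs with ⟨j, hj, rfl⟩
    simp only [Finset.mem_Icc] at hj
    by_cases h : j ∈ F
    · have hpj : (p - j) ∉ F := (hA j hj.1 hj.2).mp h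
      constructor
      · simp only [hc]; rw [if_pos h]; omega
      · simp only [hc]; rw [if_pos h]; exact hpj
    · have hpj : (p - j) ∈ F := by
        by_contra hpj
        exact h ((hA j hj.1 hj.2).mpr hpj)
      constructor
      · simp only [hc]; rw [if_neg h]; constructor <;> omega
      · simp only [hc]; rw [if_neg h, show p - (p - j) = j by ring]; exact h
  · rintro ⟨hFcard, hB⟩ j hj1 hjm
    constructor
    · intro hjF
      exact (hB j hjF).2
    · intro hpj
      by_contra hjF
      -- map each element of F to its pair index; it misses j, contradiction by counting
      set d : Int → Int := fun s => if s ≤ m then s else p - s with hd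
      have hno_fix : ∀ s ∈ F, p - s ≠ s := by
        intro s hs he
        have := (hB s hs).2
        rw [he] at this
        exact this hs
      have hdmem : ∀ s ∈ F, d s ∈ (Finset.Icc 1 m).erase j := by
        intro s hs
        obtain ⟨⟨hs1, hs2⟩, hsd⟩ := hB s hs
        have hne := hno_fix s hs
        rw [Finset.mem_erase, Finset.mem_Icc]
        by_cases h : s ≤ m
        · simp only [hd]; rw [if_pos h]
          exact ⟨fun he => hjF (he ▸ hs), hs1, h⟩
        · simp only [hd]; rw [if_neg h]
          refine ⟨?_, ?_⟩
          · intro he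
            apply hpj
            have : s = p - j := by omega
            rwa [← this]
          · omega
      have hdinj : Set.InjOn d F := by
        intro s1 hs1 s2 hs2 he
        have h1' := hB s1 (by simpa using hs1)
        have h2' := hB s2 (by simpa using hs2)
        by_cases a1 : s1 ≤ m <;> by_cases a2 : s2 ≤ m <;>
          simp only [hd, a1, a2, if_pos] at he
        · exact he
        · exfalso
          have : p - s1 = s2 := by omega
          exact h1'.2 (this ▸ (by simpa using hs2))
        · exfalso
          have : p - s2 = s1 := by omega
          exact h2'.2 (this ▸ (by simpa using hs1))
        · omega
      have hsub : Finset.image d F ⊆ (Finset.Icc 1 m).erase j := by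
        intro x hx
        rcases Finset.mem_image.mp hx with ⟨s, hs, rfl⟩
        exact hdmem s hs
      have hc1 : (Finset.image d F).card = F.card := Finset.card_image_of_injOn (by
        intro a ha b hb; exact hdinj (by simpa using ha) (by simpa using hb))
      have hc2 := Finset.card_le_card hsub
      have hjIcc : j ∈ Finset.Icc (1:Int) m := Finset.mem_Icc.mpr ⟨hj1, hjm⟩
      have hc3 : ((Finset.Icc (1:Int) m).erase j).card = (Finset.Icc (1:Int) m).card - 1 :=
        Finset.card_erase_of_mem hjIcc
      have hcardIcc : ((Finset.Icc (1:Int) m).card : Int) = m := by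
        rw [Int.card_Icc]; omega
      have hpos : 1 ≤ (Finset.Icc (1:Int) m).card := Finset.card_pos.mpr ⟨j, hjIcc⟩
      omega

-- ===== VERDICT (by name: the statement is the Claim_ definition above) =====
theorem is_valid_tournament_set_spec : Claim_equal_is_valid_tournament_set := by
  intro S p _
  unfold Spec_is_valid_tournament_set is_valid_tournament_set is_valid_tournament_set_alt
  set m := PySem.Int.floordiv (p - 1) 2 with hm
  have hdiv : m * 2 ≤ p - 1 ∧ p - 1 < (m + 1) * 2 :=
    (PySem.Int.floordiv_eq_iff_of_pos (by omega)).mp hm.symm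
  by_cases hlen : (S.length : Int) = m
  · simp only [hlen, ne_eq, not_true_eq_false, if_false, decide_true, Bool.true_and]
    set T := PySem.Set.ofList S with hT
    set F := S.toFinset with hF
    have hmemc : ∀ x : Int, T.contains x = true ↔ x ∈ F := by
      intro x
      rw [PySem.Set.contains_iff, hT, PySem.Set.mem_ofList, hF, List.mem_toFinset]
    have hTF : T.toFinset = F := by
      ext x; rw [List.mem_toFinset, hT, PySem.Set.mem_ofList, hF, List.mem_toFinset]
    have hTlen : T.length = F.card := by
      rw [← hTF]; exact (List.toFinset_card_of_nodup (PySem.Set.nodup_ofList S)).symm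
    have hcardle : (F.card : Int) ≤ m := by
      have h := S.toFinset_card_le
      rw [← hF] at h
      omega
    have key := pvKey F p m (by omega) (by omega) hcardle
    rw [Bool.eq_iff_iff, pvALoop_eq_true]
    have hL : (∀ j ∈ PySem.List.pyRange 1 (m + 1) 1, ¬(T.contains j = T.contains (p - j))) ↔
        (∀ j : Int, 1 ≤ j → j ≤ m → ((j ∈ F) ↔ (p - j) ∉ F)) := by
      have hone : ∀ x y : Int, (¬ T.contains x = T.contains y) ↔ ((x ∈ F) ↔ y ∉ F) := by
        intro x y
        rw [← hmemc x, ← hmemc y]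
        generalize T.contains x = a
        generalize T.contains y = b
        cases a <;> cases b <;> simp
      constructor
      · intro h j h1 h2
        exact (hone j (p - j)).mp (h j (by rw [PySem.List.mem_pyRange_one]; omega))
      · intro h j hj
        rw [PySem.List.mem_pyRange_one] at hj
        exact (hone j (p - j)).mpr (h j (by omega) (by omega))
    have hR : ((decide ((T.length : Int) = m) &&
          T.all (fun s => decide (1 ≤ s ∧ s ≤ p - 1) && !(T.contains (p - s)))) = true) ↔
        ((F.card : Int) = m ∧ ∀ s ∈ F, (1 ≤ s ∧ s ≤ p - 1) ∧ (p - s) ∉ F) := by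
      rw [Bool.and_eq_true, List.all_eq_true]
      constructor
      · rintro ⟨h1, h2⟩
        refine ⟨by rw [← hTlen]; exact_mod_cast of_decide_eq_true h1, ?_⟩
        intro s hs
        have hsT : s ∈ T := by
          rw [hT, PySem.Set.mem_ofList]; rw [hF, List.mem_toFinset] at hs; exact hs
        have := h2 s hsT
        rw [Bool.and_eq_true, Bool.not_eq_true', decide_eq_true_eq] at this
        refine ⟨this.1, fun hcF => ?_⟩
        have hcc := (hmemc (p - s)).mpr hcF
        rw [this.2] at hcc
        exact Bool.false_ne_true hcc
      · rintro ⟨h1, h2⟩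
        constructor
        · rw [hTlen]; exact decide_eq_true (by exact_mod_cast h1)
        · intro s hsT
          have hs : s ∈ F := by
            rw [hF, List.mem_toFinset]; rw [hT, PySem.Set.mem_ofList] at hsT; exact hsT
          obtain ⟨ha, hb⟩ := h2 s hs
          rw [Bool.and_eq_true, Bool.not_eq_true', decide_eq_true_eq]
          refine ⟨ha, ?_⟩
          by_contra hc
          rw [Bool.not_eq_false] at hc
          exact hb ((hmemc (p - s)).mp hc)
    rw [hL, hR]
    exact key
  · simp [hlen]
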